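-- pv_equiv track=rewrite | github.com/varkirsova/alg_2sem_lab2 | task2_7.py | ac_from_rle
-- ===== SOURCE A (Python) =====
-- def ac_from_rle(rle):
--     out = []
--     for run, val in rle:
--         if (run, val) == (0, 0):
--             while len(out) < 63:
--                 out.append(0)
--             break
--         if (run, val) == (15, 0):
--             out.extend([0] * 16)
--         else:
--             out.extend([0] * run)
--             out.append(val)
--
--     if len(out) < 63:
--         out.extend([0] * (63 - len(out)))
--
--     return out[:63]
-- ===== SOURCE B (Python) =====
-- def ac_from_rle(rle):
--     return _decode(rle, 63)
--
--
-- def _decode(rle, slots):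
--     # returns exactly max(slots, 0) coefficients decoded from rle
--     if not rle or slots <= 0:
--         return [0] * max(slots, 0)
--     (run, val), rest = rle[0], rle[1:]
--     if run == 0 and val == 0:
--         return [0] * slots
--     if run == 15 and val == 0:
--         return [0] * min(16, slots) + _decode(rest, slots - 16)
--     k = max(run, 0)
--     if k < slots:
--         return [0] * k + [val] + _decode(rest, slots - k - 1)
--     return [0] * slots + _decode(rest, slots - k - 1)
-- ===== Notes on version B (the rewrite author's own statement) =====
-- stated objective: alternative
-- what changed: B is a structural recursion carrying a remaining-slot budget: each pair emits its block of coefficients by list concatenation and recurses on the tail, so the output is built front-to-back already clipped to 63 with no mutable buffer, no final padding and no slicing.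
import Mathlib
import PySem

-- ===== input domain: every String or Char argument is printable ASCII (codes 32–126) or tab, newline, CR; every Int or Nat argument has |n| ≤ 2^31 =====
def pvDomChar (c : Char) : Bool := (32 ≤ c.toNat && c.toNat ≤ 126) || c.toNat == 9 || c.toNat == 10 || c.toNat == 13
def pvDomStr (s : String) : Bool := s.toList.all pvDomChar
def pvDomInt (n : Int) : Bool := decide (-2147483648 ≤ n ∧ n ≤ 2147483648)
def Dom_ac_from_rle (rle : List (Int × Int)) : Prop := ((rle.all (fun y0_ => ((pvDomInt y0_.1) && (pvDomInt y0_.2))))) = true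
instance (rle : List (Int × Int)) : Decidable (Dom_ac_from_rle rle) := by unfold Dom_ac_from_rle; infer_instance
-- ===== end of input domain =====

-- B decodes recursively with a remaining-slot budget, emitting each pair's block by
-- concatenation, already clipped to 63 — no buffer, no final padding, no slicing
-- (objective: alternative, same cost).

-- ===== PORT A =====
-- A's loop; the (0,0) branch performs the 'while len(out) < 63: out.append(0)' padding and
-- breaks (replicate with Nat subtraction is empty when len ≥ 63, exactly the while loop);
-- '[0]*run' for a negative run is the empty list, matching Int.toNat.
def acA_loop : List (Int × Int) → List Int → List Int
  | [], out => out
  | (run, val) :: rest, out =>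
    if run = 0 ∧ val = 0 then out ++ List.replicate (63 - out.length) 0
    else if run = 15 ∧ val = 0 then acA_loop rest (out ++ List.replicate 16 0)
    else acA_loop rest (out ++ List.replicate run.toNat 0 ++ [val])

def ac_from_rle (rle : List (Int × Int)) : List Int :=
  let out := acA_loop rle []
  let out := if out.length < 63 then out ++ List.replicate (63 - out.length) 0 else out
  out.take 63

-- ===== PORT B =====
-- '_decode(rle, slots)': '[0]*m' for an Int m is List.replicate m.toNat 0 (empty when m ≤ 0).
def acB_decode : List (Int × Int) → Int → List Int
  | [], slots => List.replicate (max slots 0).toNat 0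
  | (run, val) :: rest, slots =>
    if slots ≤ 0 then List.replicate (max slots 0).toNat 0
    else if run = 0 ∧ val = 0 then List.replicate slots.toNat 0
    else if run = 15 ∧ val = 0 then
      List.replicate (min 16 slots).toNat 0 ++ acB_decode rest (slots - 16)
    else
      let k := max run 0
      if k < slots then
        List.replicate k.toNat 0 ++ [val] ++ acB_decode rest (slots - k - 1)
      else
        List.replicate slots.toNat 0 ++ acB_decode rest (slots - k - 1)

def ac_from_rle_alt (rle : List (Int × Int)) : List Int := acB_decode rle 63

-- ===== PRECONDITION & SPEC =====
def Spec_ac_from_rle (rle : List (Int × Int)) (out : List Int) : Prop := out = ac_from_rle_alt rle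
instance (rle : List (Int × Int)) (out : List Int) : Decidable (Spec_ac_from_rle rle out) := by unfold Spec_ac_from_rle; infer_instance

-- ===== CLAIM (what is proved, stated in full; the proofs are below) =====
def Claim_equal_ac_from_rle : Prop := ∀ (rle : List (Int × Int)), Dom_ac_from_rle rle → Spec_ac_from_rle rle (ac_from_rle rle)

-- ===== LEMMAS AND PROOFS =====

-- A's final pad-then-truncate as one function
def pad (l : List Int) : List Int := (l ++ List.replicate (63 - l.length) 0).take 63

theorem a_eq_pad (rle : List (Int × Int)) : ac_from_rle rle = pad (acA_loop rle []) := by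
  unfold ac_from_rle pad
  by_cases h : (acA_loop rle []).length < 63
  · simp [h]
  · simp [h, (by omega : 63 - (acA_loop rle []).length = 0)]

-- A's loop only ever appends to its accumulator
theorem acA_loop_append (rle : List (Int × Int)) :
    ∀ out : List Int, ∃ t, acA_loop rle out = out ++ t := by
  induction rle with
  | nil => intro out; exact ⟨[], by simp [acA_loop]⟩
  | cons p rest ih =>
    intro out
    obtain ⟨run, val⟩ := p
    by_cases h0 : run = 0 ∧ val = 0
    · exact ⟨List.replicate (63 - out.length) 0, by simp only [acA_loop, if_pos h0]⟩
    · by_cases h15 : run = 15 ∧ val = 0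
      · obtain ⟨t, ht⟩ := ih (out ++ List.replicate 16 0)
        refine ⟨List.replicate 16 0 ++ t, ?_⟩
        simp only [acA_loop, if_neg h0, if_pos h15]
        rw [ht, List.append_assoc]
      · obtain ⟨t, ht⟩ := ih (out ++ List.replicate run.toNat 0 ++ [val])
        refine ⟨List.replicate run.toNat 0 ++ [val] ++ t, ?_⟩
        simp only [acA_loop, if_neg h0, if_neg h15]
        rw [ht]
        simp [List.append_assoc]

theorem pad_long (out t : List Int) (h : 63 ≤ out.length) :
    pad (out ++ t) = out.take 63 := by
  unfold pad
  rw [(by simp; omega : 63 - (out ++ t).length = 0)]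
  simp [List.take_append, (by omega : 63 - out.length = 0)]

-- the core correspondence: padding A's loop result equals B's budgeted decode glued after out
theorem main_loop (rle : List (Int × Int)) :
    ∀ out : List Int, pad (acA_loop rle out) = out.take 63 ++ acB_decode rle (63 - out.length) := by
  induction rle with
  | nil =>
    intro out
    simp only [acA_loop, acB_decode]
    unfold pad
    by_cases h : out.length < 63
    · rw [List.take_of_length_le (by simp; omega), List.take_of_length_le (by omega)]
      congr 1
      congr 1
      omega
    · rw [(by omega : 63 - out.length = 0),
          (by omega : max ((63:Int) - out.length) 0 = 0)]
      simp
  | cons p rest ih =>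
    intro out
    obtain ⟨run, val⟩ := p
    by_cases hbig : (63 : Int) - out.length ≤ 0
    · have hlen : 63 ≤ out.length := by omega
      obtain ⟨t, ht⟩ := acA_loop_append ((run, val) :: rest) out
      rw [ht, pad_long out t hlen]
      simp only [acB_decode, if_pos hbig]
      simp [(by omega : max ((63:Int) - out.length) 0 = 0)]
    · have hlt : out.length < 63 := by omega
      by_cases h0 : run = 0 ∧ val = 0
      · -- EOB: A pads to 63 and stops; B emits all remaining zeros
        simp only [acA_loop, acB_decode, if_pos h0, if_neg hbig]
        unfold pad
        rw [(by simp; omega : 63 - (out ++ List.replicate (63 - out.length) (0:Int)).length = 0)]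
        rw [List.take_of_length_le (by simp; omega), List.take_of_length_le (by omega)]
        simp
      · by_cases h15 : run = 15 ∧ val = 0
        · -- ZRL
          simp only [acA_loop, acB_decode, if_neg h0, if_pos h15, if_neg hbig]
          rw [ih (out ++ List.replicate 16 0)]
          rw [List.take_append, List.take_of_length_le (by omega), List.take_replicate]
          simp only [List.length_append, List.length_replicate, List.append_assoc]
          congr 2
          · congr 1
            omega
          · congr 1
            push_cast
            ring
        · -- ordinary pair
          simp only [acA_loop, acB_decode, if_neg h0, if_neg h15, if_neg hbig]
          rw [ih (out ++ List.replicate run.toNat 0 ++ [val])]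
          have hk : (max run 0).toNat = run.toNat := by omega
          by_cases hfits : max run 0 < (63 : Int) - out.length
          · rw [if_pos hfits]
            have hrun : (run.toNat : Int) = max run 0 := by omega
            rw [List.take_of_length_le (by
                  simp only [List.length_append, List.length_replicate, List.length_cons,
                    List.length_nil]
                  omega),
                List.take_of_length_le (by omega)]
            rw [hk]
            simp only [List.append_assoc]
            congr 3
            simp only [List.length_append, List.length_replicate, List.length_cons,
              List.length_nil]
            congr 1
            push_cast [hrun]
            omega
          · rw [if_neg hfits]
            have hrun : 63 ≤ out.length + run.toNat := by omega
            rw [List.append_assoc, List.take_append, List.take_of_length_le (by omega)]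
            rw [(show List.take (63 - out.length) (List.replicate run.toNat (0:Int) ++ [val])
                  = List.replicate (63 - out.length) 0 by
              rw [List.take_append, List.take_replicate,
                  (by omega : min (63 - out.length) run.toNat = 63 - out.length)]
              simp only [List.length_replicate]
              rw [(by omega : 63 - out.length - run.toNat = 0)]
              simp)]
            simp only [List.length_append, List.length_replicate, List.length_cons,
              List.length_nil, List.append_assoc]
            congr 2
            · congr 1
              omega
            · congr 1
              push_cast
              omega

-- ===== VERDICT (by name: the statement is the Claim_ definition above) =====
theorem ac_from_rle_spec : Claim_equal_ac_from_rle := by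
  intro rle _
  unfold Spec_ac_from_rle ac_from_rle_alt
  rw [a_eq_pad, main_loop rle []]
  simp
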